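-- pv_equiv track=rewrite | github.com/laujialiang0101/flt-kpi-api | main.py | check_password_dynamod
-- ===== SOURCE A (Python) =====
-- def check_password_dynamod(plain_password: str, stored_password: str, user_code: str) -> bool:
--     """
--     Check if password matches using multiple encoding methods.
--     Handles Dynamod POS XOR-based password encoding.
--
--     Password encoding varies by user:
--     - Some passwords are stored in plain text (no encoding)
--     - Some are XOR encoded with patterns derived from user code
--     - For IC users (12-digit numeric codes), password = last 4 digits
--     """
--     if not stored_password:
--         return False
--
--     # Method 1: Direct comparison (if stored password is plain text)
--     if plain_password == stored_password:
--         return True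
--
--     # Method 2: For IC users (12-digit numeric code), password should be last 4 digits
--     # We verify by checking if the entered password matches expected and stored is encoded version
--     if len(user_code) == 12 and user_code.isdigit():
--         expected_password = user_code[-4:]
--         if plain_password == expected_password:
--             # Verify the stored password length matches (4 digits)
--             if len(stored_password) == 4:
--                 # For IC users, we trust that if they enter the correct expected password
--                 # (last 4 digits of IC), they are authorized
--                 return True
--         # For IC users, ONLY accept the expected password (last 4 digits)
--         # Don't allow other passwords even if they would pass other methods
--         return False
--
--     # Method 4: Try fixed XOR key patterns discovered from known passwords
--     fixed_patterns = [
--         [2, 8, 5, 9, 2, 8],   # Pattern from LTK (506050 -> 383938)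
--         [4, 1, 5, 14],        # Pattern from ID 30 (9202 -> 535<)
--         [6, 3, 4, 2, 3, 4],   # Common 6-char pattern
--         [6, 3, 4],            # Short repeating pattern
--         [15, 13, 13, 15],     # Pattern from IC 980101115197
--     ]
--     for pattern in fixed_patterns:
--         try:
--             encoded = []
--             for i, char in enumerate(plain_password):
--                 xor_key = pattern[i % len(pattern)]
--                 encoded.append(chr(ord(char) ^ xor_key))
--             if ''.join(encoded) == stored_password:
--                 return True
--         except:
--             pass
--
--     # Method 5: Try various XOR key offsets based on user code
--     for offset in range(65, 80):
--         try:
--             encoded = []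
--             user_code_upper = user_code.upper()
--             for i, char in enumerate(plain_password):
--                 code_char = user_code_upper[i % len(user_code_upper)]
--                 xor_key = ord(code_char) - offset
--                 if xor_key < 0:
--                     xor_key = abs(xor_key)
--                 encoded.append(chr(ord(char) ^ xor_key))
--             if ''.join(encoded) == stored_password:
--                 return True
--         except:
--             pass
--
--     return False
-- ===== SOURCE B (Python) =====
-- FIXED_PATTERNS = [
--     [2, 8, 5, 9, 2, 8],
--     [4, 1, 5, 14],
--     [6, 3, 4, 2, 3, 4],
--     [6, 3, 4],
--     [15, 13, 13, 15],
-- ]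
--
--
-- def check_password_dynamod(plain_password: str, stored_password: str, user_code: str) -> bool:
--     if not stored_password:
--         return False
--
--     if plain_password == stored_password:
--         return True
--
--     # IC users (12-digit numeric code): only the last 4 digits are accepted.
--     if len(user_code) == 12 and user_code.isdigit():
--         return plain_password == user_code[-4:] and len(stored_password) == 4
--
--     # Any XOR encoding preserves length, so a match is only possible when the
--     # lengths agree; in that case compute the key stream plain XOR stored once.
--     if len(plain_password) == len(stored_password):
--         key = [ord(p) ^ ord(s) for p, s in zip(plain_password, stored_password)]
--
--         # Fixed patterns: the key stream must be the pattern repeated.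
--         for pattern in FIXED_PATTERNS:
--             if all(k == pattern[i % len(pattern)] for i, k in enumerate(key)):
--                 return True
--
--         # User-code offsets 65..79 (empty user_code can never match: the
--         # original index i % 0 yields no key stream at all).
--         if user_code:
--             upper = user_code.upper()
--             n = len(upper)
--             for offset in range(65, 80):
--                 if all(k == abs(ord(upper[i % n]) - offset) for i, k in enumerate(key)):
--                     return True
--
--     return False
-- ===== Notes on version B (the rewrite author's own statement) =====
-- stated objective: alternative
-- what changed: Instead of encoding the plaintext separately for every fixed pattern and every offset 65..79 and comparing the built strings, B computes the XOR key stream plain^stored once (only possible when the lengths match) and tests each candidate key against it with a periodicity check.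
import Mathlib
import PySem

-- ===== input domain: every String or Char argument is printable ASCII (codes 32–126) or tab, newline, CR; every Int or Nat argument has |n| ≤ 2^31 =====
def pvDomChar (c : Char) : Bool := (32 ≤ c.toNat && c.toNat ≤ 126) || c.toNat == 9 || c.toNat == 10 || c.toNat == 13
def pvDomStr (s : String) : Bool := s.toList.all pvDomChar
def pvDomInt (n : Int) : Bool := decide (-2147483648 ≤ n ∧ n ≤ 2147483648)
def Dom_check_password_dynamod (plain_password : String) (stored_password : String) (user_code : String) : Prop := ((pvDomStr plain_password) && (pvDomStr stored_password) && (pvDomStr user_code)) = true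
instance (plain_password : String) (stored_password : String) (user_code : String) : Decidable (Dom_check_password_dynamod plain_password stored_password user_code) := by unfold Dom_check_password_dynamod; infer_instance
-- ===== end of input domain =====

-- B recomputes nothing per pattern/offset: when the lengths agree it derives the XOR key
-- stream plain^stored ONCE and tests each candidate key against it (objective: alternative).

-- ===== PORT A =====
def pvFixedPatterns : List (List Nat) :=
  [[2, 8, 5, 9, 2, 8], [4, 1, 5, 14], [6, 3, 4, 2, 3, 4], [6, 3, 4], [15, 13, 13, 15]]

-- xor key at index i for a fixed pattern: pattern[i % len(pattern)]
def pvKeyPat (pat : List Nat) (i : Int) : Nat :=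
  PySem.List.pyGetD pat (PySem.Int.mod i pat.length) 0

-- xor key at index i for the offset method: abs(ord(user_code_upper[i % len]) - offset)
def pvKeyOff (uUp : List Char) (off : Int) (i : Int) : Nat :=
  (((PySem.List.pyGetD uUp (PySem.Int.mod i uUp.length) ' ').toNat : Int) - off).natAbs

-- Method 4 encoding loop: for i, char in enumerate(plain): encoded.append(chr(ord(char) ^ key))
def pvEncodeFixed (pat : List Nat) (p : List Char) : List Char :=
  (PySem.List.enumerate p 0).foldl
    (fun acc ic => acc ++ [Char.ofNat (ic.2.toNat ^^^ pvKeyPat pat ic.1)]) []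

-- Method 5 encoding loop
def pvEncodeOffset (uUp : List Char) (off : Int) (p : List Char) : List Char :=
  (PySem.List.enumerate p 0).foldl
    (fun acc ic => acc ++ [Char.ofNat (ic.2.toNat ^^^ pvKeyOff uUp off ic.1)]) []

def check_password_dynamod (plain_password : String) (stored_password : String) (user_code : String) : Bool :=
  let p := plain_password.toList
  let s := stored_password.toList
  let u := user_code.toList
  if s.isEmpty then false
  else if p == s then true
  else if u.length == 12 && (decide (u ≠ []) && u.all PySem.Chars.isdigit) then
    -- expected_password = user_code[-4:]
    (if p == PySem.List.slice u (some (-4)) none then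
      (if s.length == 4 then true else false)
     else false)
  else if pvFixedPatterns.any (fun pat => pvEncodeFixed pat p == s) then true
  else if (PySem.List.pyRange 65 80 1).any (fun off =>
      -- with an empty user_code the loop body raises ZeroDivisionError on its first iteration
      -- (swallowed by the bare except → no match); with empty plain too, '' never equals the
      -- non-empty stored password, so the guarded comparison below is exact
      if u.isEmpty then false
      else pvEncodeOffset (PySem.Chars.upper u) off p == s) then true
  else false

-- ===== PORT B =====
-- key stream: [ord(p) ^ ord(s) for p, s in zip(plain, stored)]
def pvKeyStream (p s : List Char) : List Nat :=
  (p.zip s).map (fun cs => cs.1.toNat ^^^ cs.2.toNat)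

def pvMatchesPattern (key : List Nat) (pat : List Nat) : Bool :=
  (PySem.List.enumerate key 0).all (fun ik => ik.2 == pvKeyPat pat ik.1)

def pvMatchesOffset (key : List Nat) (uUp : List Char) (off : Int) : Bool :=
  (PySem.List.enumerate key 0).all (fun ik => ik.2 == pvKeyOff uUp off ik.1)

def check_password_dynamod_alt (plain_password : String) (stored_password : String) (user_code : String) : Bool :=
  let p := plain_password.toList
  let s := stored_password.toList
  let u := user_code.toList
  if s.isEmpty then false
  else if p == s then true
  else if u.length == 12 && (decide (u ≠ []) && u.all PySem.Chars.isdigit) then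
    (p == PySem.List.slice u (some (-4)) none) && (s.length == 4)
  else if p.length == s.length then
    let key := pvKeyStream p s
    if pvFixedPatterns.any (fun pat => pvMatchesPattern key pat) then true
    else if !u.isEmpty then
      (PySem.List.pyRange 65 80 1).any (fun off => pvMatchesOffset key (PySem.Chars.upper u) off)
    else false
  else false

-- ===== PRECONDITION & SPEC =====
def Spec_check_password_dynamod (plain_password : String) (stored_password : String) (user_code : String) (out : Bool) : Prop := out = check_password_dynamod_alt plain_password stored_password user_code
instance (plain_password : String) (stored_password : String) (user_code : String) (out : Bool) : Decidable (Spec_check_password_dynamod plain_password stored_password user_code out) := by unfold Spec_check_password_dynamod; infer_instance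

-- ===== CLAIM (what is proved, stated in full; the proofs are below) =====
def Claim_equal_check_password_dynamod : Prop := ∀ (plain_password : String) (stored_password : String) (user_code : String), Dom_check_password_dynamod plain_password stored_password user_code → Spec_check_password_dynamod plain_password stored_password user_code (check_password_dynamod plain_password stored_password user_code)

-- ===== LEMMAS AND PROOFS =====

-- enumerate over a mapped list keeps indices and maps the values
theorem pv_enum_map {α β : Type} (f : α → β) (l : List α) : ∀ (j : Int),
    PySem.List.enumerate (l.map f) j = (PySem.List.enumerate l j).map (fun pr => (pr.1, f pr.2)) := by
  induction l with
  | nil => intro j; simp [PySem.List.enumerate]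
  | cons a l ih => intro j; simp [PySem.List.enumerate_cons, ih]

-- encode-then-compare characterised by the XOR key stream
theorem pv_enc_eq_iff (k : Int → Nat) : ∀ (p s : List Char) (j : Int),
    (∀ ic ∈ PySem.List.enumerate p j, ic.2.toNat ^^^ k ic.1 < 55296) →
    ((PySem.List.enumerate p j).map (fun ic => Char.ofNat (ic.2.toNat ^^^ k ic.1)) = s
      ↔ p.length = s.length ∧
        ∀ pr ∈ PySem.List.enumerate (p.zip s) j, pr.2.1.toNat ^^^ pr.2.2.toNat = k pr.1) := by
  intro p
  induction p with
  | nil =>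
    intro s j _
    cases s <;> simp [PySem.List.enumerate]
  | cons a p ih =>
    intro s j hv
    cases s with
    | nil => simp [PySem.List.enumerate_cons]
    | cons b s =>
      have hva : (a.toNat ^^^ k j) < 55296 := by
        have := hv (j, a) (by simp [PySem.List.enumerate_cons]); simpa using this
      have hvrest : ∀ ic ∈ PySem.List.enumerate p (j + 1), ic.2.toNat ^^^ k ic.1 < 55296 := by
        intro ic hic; exact hv ic (by simp [PySem.List.enumerate_cons, hic])
      have hvalid : (a.toNat ^^^ k j).isValidChar := Or.inl hva
      have hhead : (Char.ofNat (a.toNat ^^^ k j) = b) ↔ (a.toNat ^^^ b.toNat = k j) := by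
        constructor
        · intro h
          have ht := congrArg Char.toNat h
          rw [Char.toNat_ofNat, if_pos hvalid] at ht
          rw [← ht, ← Nat.xor_assoc, Nat.xor_self, Nat.zero_xor]
        · intro h
          rw [← h, ← Nat.xor_assoc, Nat.xor_self, Nat.zero_xor, Char.ofNat_toNat]
      rw [PySem.List.enumerate_cons, List.map_cons]
      simp only [List.cons.injEq, List.zip_cons_cons, PySem.List.enumerate_cons,
        List.mem_cons, List.length_cons]
      constructor
      · rintro ⟨h1, h2⟩
        rw [ih s (j + 1) hvrest] at h2
        obtain ⟨hl, hr⟩ := h2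
        refine ⟨by omega, ?_⟩
        rintro pr (h | h)
        · subst h; simpa using hhead.mp h1
        · exact hr pr h
      · rintro ⟨hl, hr⟩
        refine ⟨hhead.mpr (by simpa using hr (j, (a, b)) (Or.inl rfl)), ?_⟩
        rw [ih s (j + 1) hvrest]
        exact ⟨by omega, fun pr h => hr pr (Or.inr h)⟩

theorem pv_encodeFixed_eq (pat : List Nat) (p : List Char) :
    pvEncodeFixed pat p
      = (PySem.List.enumerate p 0).map (fun ic => Char.ofNat (ic.2.toNat ^^^ pvKeyPat pat ic.1)) := by
  rw [pvEncodeFixed, PySem.List.foldl_append_singleton_eq_map]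
  simp

theorem pv_encodeOffset_eq (uUp : List Char) (off : Int) (p : List Char) :
    pvEncodeOffset uUp off p
      = (PySem.List.enumerate p 0).map (fun ic => Char.ofNat (ic.2.toNat ^^^ pvKeyOff uUp off ic.1)) := by
  rw [pvEncodeOffset, PySem.List.foldl_append_singleton_eq_map]
  simp

-- B's all-over-key-stream test, characterised the same way
theorem pv_all_key (p s : List Char) (k : Int → Nat) :
    ((PySem.List.enumerate (pvKeyStream p s) 0).all (fun ik => ik.2 == k ik.1) = true)
      ↔ ∀ pr ∈ PySem.List.enumerate (p.zip s) 0, pr.2.1.toNat ^^^ pr.2.2.toNat = k pr.1 := by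
  rw [pvKeyStream, pv_enum_map]
  simp [List.all_eq_true]

theorem pv_keyPat_lt (pat : List Nat) (hpat : ∀ x ∈ pat, x < 128) (i : Int) :
    pvKeyPat pat i < 128 := by
  unfold pvKeyPat
  rcases pat with _ | ⟨x, pat⟩
  · simp [PySem.List.pyGetD, PySem.List.pyGet?, PySem.List.pyIdx?, PySem.Int.mod]
  · have hlen : (0 : Int) < ((x :: pat).length : Int) := by simp
    rw [PySem.List.pyGetD_of_nonneg _ _ (PySem.Int.mod_nonneg _ hlen)]
    by_cases hm : (PySem.Int.mod i ((x :: pat).length : Int)).toNat < (x :: pat).length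
    · rw [List.getD_eq_getElem _ _ hm]
      exact hpat _ (List.getElem_mem hm)
    · rw [List.getD_eq_default _ _ (by omega)]
      omega

theorem pv_keyOff_lt (uUp : List Char) (off i : Int) (hup : ∀ c ∈ uUp, c.toNat < 128)
    (hoff : 65 ≤ off ∧ off < 80) : pvKeyOff uUp off i < 128 := by
  unfold pvKeyOff
  have hc : (PySem.List.pyGetD uUp (PySem.Int.mod i uUp.length) ' ').toNat < 128 := by
    rcases uUp with _ | ⟨x, uUp⟩
    · simp [PySem.List.pyGetD, PySem.List.pyGet?, PySem.List.pyIdx?, PySem.Int.mod]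
    · have hlen : (0 : Int) < (((x :: uUp).length : Nat) : Int) := by simp
      rw [PySem.List.pyGetD_of_nonneg _ _ (PySem.Int.mod_nonneg _ hlen)]
      by_cases hm : (PySem.Int.mod i ((x :: uUp).length : Int)).toNat < (x :: uUp).length
      · rw [List.getD_eq_getElem _ _ hm]
        exact hup _ (List.getElem_mem hm)
      · rw [List.getD_eq_default _ _ (by omega)]
        decide
  omega

theorem pv_dom_lt (s : String) (h : pvDomStr s = true) : ∀ c ∈ s.toList, c.toNat < 128 := by
  intro c hc
  have := (List.all_eq_true.mp h) c hc
  simp [pvDomChar] at this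
  omega

theorem pv_upper_lt (u : List Char) (hu : ∀ c ∈ u, c.toNat < 128) :
    ∀ c ∈ PySem.Chars.upper u, c.toNat < 128 := by
  intro c hc
  rw [show PySem.Chars.upper u = u.map PySem.Chars.upperChar from by simp [PySem.Chars.upper]] at hc
  obtain ⟨d, hd, rfl⟩ := List.mem_map.mp hc
  have hdlt := hu d hd
  unfold PySem.Chars.upperChar
  split_ifs with h1
  · rw [Char.toNat_ofNat]; split_ifs <;> omega
  · exact hdlt

-- validity of every encoded character, from the two bounds
theorem pv_valid (k : Int → Nat) (p : List Char) (hp : ∀ c ∈ p, c.toNat < 128)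
    (hk : ∀ i, k i < 128) :
    ∀ ic ∈ PySem.List.enumerate p 0, ic.2.toNat ^^^ k ic.1 < 55296 := by
  intro ic hic
  obtain ⟨m, hm, rfl⟩ := (PySem.List.mem_enumerate_iff p 0 ic).mp hic
  have h1 : (p[m]).toNat < 2 ^ 7 := hp _ (List.getElem_mem hm)
  have h2 : k (0 + (m : Int)) < 2 ^ 7 := hk _
  have := Nat.xor_lt_two_pow h1 h2
  dsimp only
  omega

-- per-candidate equivalence, fixed patterns
theorem pv_fixed_eq (pat : List Nat) (p s : List Char) (hp : ∀ c ∈ p, c.toNat < 128)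
    (hpat : ∀ x ∈ pat, x < 128) :
    (pvEncodeFixed pat p == s)
      = (decide (p.length = s.length) && pvMatchesPattern (pvKeyStream p s) pat) := by
  rw [Bool.eq_iff_iff]
  rw [pv_encodeFixed_eq]
  simp only [beq_iff_eq, Bool.and_eq_true, decide_eq_true_eq, pvMatchesPattern, pv_all_key]
  exact pv_enc_eq_iff (pvKeyPat pat) p s 0 (pv_valid _ _ hp (pv_keyPat_lt pat hpat))

-- per-candidate equivalence, user-code offsets
theorem pv_off_eq (uUp : List Char) (off : Int) (p s : List Char)
    (hp : ∀ c ∈ p, c.toNat < 128) (hup : ∀ c ∈ uUp, c.toNat < 128)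
    (hoff : 65 ≤ off ∧ off < 80) :
    (pvEncodeOffset uUp off p == s)
      = (decide (p.length = s.length) && pvMatchesOffset (pvKeyStream p s) uUp off) := by
  rw [Bool.eq_iff_iff]
  rw [pv_encodeOffset_eq]
  simp only [beq_iff_eq, Bool.and_eq_true, decide_eq_true_eq, pvMatchesOffset, pv_all_key]
  exact pv_enc_eq_iff (pvKeyOff uUp off) p s 0
    (pv_valid _ _ hp (fun i => pv_keyOff_lt uUp off i hup hoff))

-- ===== VERDICT =====

theorem check_password_dynamod_spec : Claim_equal_check_password_dynamod := by
  intro plain stored user hDom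
  have hDom' := hDom
  simp only [Dom_check_password_dynamod, Bool.and_eq_true] at hDom'
  obtain ⟨⟨hDomP, hDomS⟩, hDomU⟩ := hDom'
  have hp := pv_dom_lt plain hDomP
  have hu := pv_dom_lt user hDomU
  unfold Spec_check_password_dynamod check_password_dynamod check_password_dynamod_alt
  simp only []
  set p := plain.toList with hpdef
  set s := stored.toList with hsdef
  set u := user.toList with hudef
  by_cases h1 : s.isEmpty
  · simp [h1]
  by_cases h2 : p = s
  · simp [h1, h2]
  by_cases h3 : (u.length == 12 && (decide (u ≠ []) && u.all PySem.Chars.isdigit)) = true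
  · simp only [h1, h3, if_false, if_true, Bool.false_eq_true]
    split_ifs <;> simp_all
  -- XOR sections
  have hpatBound : ∀ pat ∈ pvFixedPatterns, ∀ x ∈ pat, x < 128 := by decide
  have hAfix : (pvFixedPatterns.any fun pat => pvEncodeFixed pat p == s)
      = (decide (p.length = s.length)
          && pvFixedPatterns.any fun pat => pvMatchesPattern (pvKeyStream p s) pat) := by
    rw [Bool.eq_iff_iff]
    simp only [List.any_eq_true, Bool.and_eq_true]
    constructor
    · rintro ⟨pat, hmem, hcond⟩
      rw [pv_fixed_eq pat p s hp (hpatBound pat hmem)] at hcond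
      simp only [Bool.and_eq_true] at hcond
      exact ⟨hcond.1, pat, hmem, hcond.2⟩
    · rintro ⟨hlen, pat, hmem, hcond⟩
      exact ⟨pat, hmem, by rw [pv_fixed_eq pat p s hp (hpatBound pat hmem)]; simp [hlen, hcond]⟩
  have h3' : ¬(u.length = 12 ∧ ¬u = [] ∧ ∀ x ∈ u, PySem.Chars.isdigit x = true) := by
    simpa using h3
  by_cases h4 : u.isEmpty
  · -- empty user code: the offset loop never matches in either version
    rw [hAfix]
    by_cases hlen : p.length = s.length <;> simp [h1, h2, h3', h4, hlen]
  · have hAoff : ((PySem.List.pyRange 65 80 1).any fun off =>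
          if u.isEmpty then false else pvEncodeOffset (PySem.Chars.upper u) off p == s)
        = (decide (p.length = s.length)
            && (PySem.List.pyRange 65 80 1).any fun off =>
                pvMatchesOffset (pvKeyStream p s) (PySem.Chars.upper u) off) := by
      rw [Bool.eq_iff_iff]
      have h4f : u.isEmpty = false := by simpa using h4
      simp only [h4f, Bool.false_eq_true, if_false, List.any_eq_true, Bool.and_eq_true]
      constructor
      · rintro ⟨off, hmem, hcond⟩
        have hoff := PySem.List.mem_pyRange_one.mp hmem
        rw [pv_off_eq _ off p s hp (pv_upper_lt u hu) ⟨by exact_mod_cast hoff.1, by exact_mod_cast hoff.2⟩] at hcond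
        simp only [Bool.and_eq_true] at hcond
        exact ⟨hcond.1, off, hmem, hcond.2⟩
      · rintro ⟨hlen, off, hmem, hcond⟩
        have hoff := PySem.List.mem_pyRange_one.mp hmem
        refine ⟨off, hmem, ?_⟩
        rw [pv_off_eq _ off p s hp (pv_upper_lt u hu) ⟨by exact_mod_cast hoff.1, by exact_mod_cast hoff.2⟩]
        simp [hlen, hcond]
    rw [hAfix, hAoff]
    by_cases hlen : p.length = s.length <;> simp [h1, h2, h3', h4, hlen]
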